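/- GENERATED by farm/mkstatement.py from design/units.tsv (unit `start_decoder.R7b`) and the assertions of Vorbis/Spec/StartDecoderR7.lean — do not edit.
   THE STATEMENT of the proof unit `start_decoder.R7b`: segment R7b of `start_decoder` (19 instructions; entries 0x115e3c;
   exits 0x115e8d,0x113b22; ranges 0x115e3c-0x115e88)
   takes each of its entry assertions to one of its exit assertions (`Vorbis.Spec.StartDecoder.SegR7b`), given the contracts of its callees.
   What the names mean: Vorbis/Spec/Basic.lean (the shared hypotheses), Vorbis/Spec/StartDecoderR7.lean (the assertions). The theorem to prove:
   `theorem start_decoder_R7b_ok : Vorbis.Spec.start_decoder_R7b.Statement`. -/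
import Vorbis.Spec.Leaves
import Vorbis.Spec.StartDecoderR7
namespace Vorbis.Spec.start_decoder_R7b
open X86 X86.User Asan

/-- The statement of unit `start_decoder.R7b`. -/
def Statement : Prop :=
  ∀ (Lay : Layout) (_hLay : Lay.hi = 0x1000000) (μ : Microarch) (_hμ : UserX.MicroOK μ) (u₀ : State)
    (_hcode : HasCodeNat Lay u₀ Vorbis.L.start_decoder.entry Vorbis.Code.code_start_decoder.nat Vorbis.L.start_decoder.size)
    (_h_asan_load8_noabort : Asan.SmallCheck Lay μ Vorbis.WayInv (Vorbis.CodeOK u₀) [.rax, .rcx, .rdx] 8 Vorbis.L.__asan_load8_noabort.entry)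
    (_h_asan_store8_noabort : Asan.SmallCheck Lay μ Vorbis.WayInv (Vorbis.CodeOK u₀) [.rax, .rcx, .rdx] 8 Vorbis.L.__asan_store8_noabort.entry)
    (_h_error : ∀ (others : List Obj) (frames : List (Nat × FrameLayout)), Calls Lay μ Vorbis.WayInv (Vorbis.conv u₀) Vorbis.L.error.entry (Vorbis.Spec.error.spec others frames)),
    Vorbis.Spec.StartDecoder.SegR7b Lay μ u₀

end Vorbis.Spec.start_decoder_R7b
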